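-- pv_equiv track=rewrite | github.com/0Ccipher/gpuMem-race-detection | input/dat3m/gpu-bench/litmus-bench/ptx-to-C.py | split_codes
-- ===== SOURCE A (Python) =====
-- def split_codes(code):
--     codes = []
--     lines = code.split(';')
--     for ln in lines:
--         ln = ln.strip()
--         if len(ln) == 0: continue
--         ins = ln.split('|')
--         pid = 0
--         for instr in ins:
--             if len(codes) <= pid:
--                 codes.append([])
--             instr = instr.strip()
--             if len(instr) > 0:
--                 codes[pid].append(instr)
--             pid = pid+1
--     return codes
-- ===== SOURCE B (Python) =====
-- def split_codes(code):
--     rows = [seg.strip().split('|') for seg in code.split(';') if seg.strip()]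
--     width = max((len(r) for r in rows), default=0)
--     return [[r[i].strip() for r in rows if i < len(r) and r[i].strip()]
--             for i in range(width)]
-- ===== Notes on version B (the rewrite author's own statement) =====
-- stated objective: simpler
-- what changed: Replaces the interleaved per-field loop with mutable pid/padding state by a two-pass column-major construction: build the list of rows, compute the width, then emit each column with a comprehension.
import Mathlib
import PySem

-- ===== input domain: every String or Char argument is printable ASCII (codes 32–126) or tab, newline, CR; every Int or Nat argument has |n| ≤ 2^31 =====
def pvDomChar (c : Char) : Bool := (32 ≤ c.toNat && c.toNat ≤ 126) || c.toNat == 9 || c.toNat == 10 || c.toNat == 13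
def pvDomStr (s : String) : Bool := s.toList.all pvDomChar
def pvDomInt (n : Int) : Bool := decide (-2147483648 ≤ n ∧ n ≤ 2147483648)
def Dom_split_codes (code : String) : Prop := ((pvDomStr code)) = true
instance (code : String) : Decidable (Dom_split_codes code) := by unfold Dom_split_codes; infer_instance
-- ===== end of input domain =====

-- B replaces A's interleaved per-field loop (mutable pid / lazy padding) by a simpler
-- two-pass column-major construction: rows first, then each column by a comprehension.

-- ===== PORT A =====
-- A-side helper: the body of A's inner 'for instr in ins' loop (state = (codes, pid))
def pvStepA (st : List (List String) × Nat) (instr : String) : List (List String) × Nat :=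
  let codes := if st.1.length ≤ st.2 then st.1 ++ [[]] else st.1
  let instr := PySem.Str.strip instr
  let codes := if PySem.Str.len instr > 0 then codes.modify st.2 (· ++ [instr]) else codes
  (codes, st.2 + 1)

def split_codes (code : String) : List (List String) :=
  -- code.split(';'): sep is the nonempty literal ";" so split? never returns none
  ((PySem.Str.split? code ";").getD []).foldl (fun codes ln =>
    let ln := PySem.Str.strip ln
    if PySem.Str.len ln == 0 then codes
    else (((PySem.Str.split? ln "|").getD []).foldl pvStepA (codes, 0)).1)
    []

-- ===== PORT B =====
-- B-side helpers: the row builder and the column-element extractor of Source B's comprehensions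
def pvRowOf (seg : String) : Option (List String) :=
  let t := PySem.Str.strip seg
  if t = "" then none else some ((PySem.Str.split? t "|").getD [])

def pvPickOpt (i : Nat) (r : List String) : Option String :=
  match r[i]? with
  | none => none
  | some f =>
    let t := PySem.Str.strip f
    if t = "" then none else some t

def split_codes_alt (code : String) : List (List String) :=
  let rows := ((PySem.Str.split? code ";").getD []).filterMap pvRowOf
  let width := rows.foldl (fun m r => max m r.length) 0
  (List.range width).map (fun i => rows.filterMap (pvPickOpt i))

-- ===== PRECONDITION & SPEC =====
def Spec_split_codes (code : String) (out : List (List String)) : Prop := out = split_codes_alt code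
instance (code : String) (out : List (List String)) : Decidable (Spec_split_codes code out) := by unfold Spec_split_codes; infer_instance

-- ===== CLAIM (what is proved, stated in full; the proofs are below) =====
def Claim_equal_split_codes : Prop := ∀ (code : String), Dom_split_codes code → Spec_split_codes code (split_codes code)

-- ===== LEMMAS AND PROOFS =====

def pvWidth (rows : List (List String)) : Nat :=
  rows.foldr (fun r m => max r.length m) 0

lemma pv_foldl_max (rows : List (List String)) :
    ∀ a, rows.foldl (fun m r => max m r.length) a = max a (pvWidth rows) := by
  induction rows with
  | nil => intro a; simp [pvWidth]
  | cons r rs ih => intro a; simp only [List.foldl_cons, ih, pvWidth, List.foldr_cons]; omega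

lemma pv_len_eq_zero (s : String) : (PySem.Str.len s == 0) = decide (s = ""):= by
  by_cases h : s = ""
  · subst h; rfl
  · have h1 : s.toList ≠ [] := by simpa [String.toList_eq_nil_iff] using h
    have h2 : s.toList.length ≠ 0 := by simpa [List.length_eq_zero_iff] using h1
    simp [pysem, h]

lemma pv_len_pos (s : String) : (PySem.Str.len s > 0) ↔ s ≠ "" := by
  have hl : PySem.Str.len s = (s.toList.length : Int) := by simp [pysem]
  rw [hl]
  constructor
  · intro hlt he
    subst he
    simp at hlt
  · intro hne
    have h1 : s.toList ≠ [] := by simpa [String.toList_eq_nil_iff] using hne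
    have h2 : s.toList.length ≠ 0 := by simpa [List.length_eq_zero_iff] using h1
    omega

lemma pv_getD_pad (codes : List (List String)) (i : Nat) :
    (codes ++ [([] : List String)]).getD i [] = codes.getD i [] := by
  rcases lt_trichotomy i codes.length with h | h | h
  · rw [List.getD_eq_getElem _ _ (by simp; omega), List.getD_eq_getElem _ _ h]
    simp [List.getElem_append_left h]
  · subst h
    rw [List.getD_eq_getElem _ _ (by simp)]
    simp [List.getD_eq_getElem?_getD]
  · rw [List.getD_eq_getElem?_getD, List.getD_eq_getElem?_getD]
    rw [List.getElem?_eq_none (by simp; omega), List.getElem?_eq_none (by omega)]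

lemma pv_filterMap_cons_toList {a b : Type} (f : a -> Option b) (x : a) (xs : List a) :
    List.filterMap f (x :: xs) = (f x).toList ++ List.filterMap f xs := by
  cases h : f x <;> simp [h]

-- one inner step, seen through getD
lemma pv_step_getD (codes : List (List String)) (pid : Nat) (h : pid <= codes.length) (f : String) (i : Nat) :
    (pvStepA (codes, pid) f).1.getD i [] =
      codes.getD i [] ++ (if i = pid then (pvPickOpt 0 [f]).toList else []) := by
  simp only [pvStepA]
  set t := PySem.Str.strip f with ht
  have hpickv : (pvPickOpt 0 [f]).toList = if t = "" then [] else [t] := by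
    simp only [pvPickOpt, List.getElem?_cons_zero, ht]
    split_ifs <;> simp
  set padded := if codes.length <= pid then codes ++ [[]] else codes with hpad
  have hpadD : forall j, padded.getD j [] = codes.getD j [] := by
    intro j; rw [hpad]; split_ifs with hc
    · exact pv_getD_pad codes j
    · rfl
  have hpadlen : pid < padded.length := by
    rw [hpad]; split_ifs with hc
    · simp; omega
    · omega
  by_cases hz : PySem.Str.len t > 0
  · have htne : t ≠ "" := (pv_len_pos t).mp hz
    simp only [if_pos hz, hpickv, if_neg htne]
    by_cases hi : i = pid
    · subst hi
      rw [List.getD_eq_getElem?_getD, List.getElem?_modify, List.getElem?_eq_getElem hpadlen]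
      simp
      rw [← List.getD_eq_getElem _ [] hpadlen, hpadD]
      simp
    · rw [List.getD_eq_getElem?_getD, List.getElem?_modify]
      have hne : ¬ pid = i := fun hh => hi hh.symm
      simp only [hne, if_false]
      simp [hi, ← List.getD_eq_getElem?_getD, hpadD]
  · have htne : t = "" := by
      by_contra hne
      exact hz ((pv_len_pos t).mpr hne)
    simp only [if_neg hz, hpickv, if_pos htne, hpadD]
    split_ifs <;> simp
lemma pv_step_len (codes : List (List String)) (pid : Nat) (h : pid ≤ codes.length) (f : String) :
    (pvStepA (codes, pid) f).1.length = max codes.length (pid + 1) := by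
  simp only [pvStepA]
  split_ifs <;> simp <;> omega

lemma pv_inner_len (fields : List String) :
    ∀ (codes : List (List String)) (pid : Nat), pid ≤ codes.length →
    (fields.foldl pvStepA (codes, pid)).1.length = max codes.length (pid + fields.length) := by
  induction fields with
  | nil => intro codes pid h; simp; omega
  | cons f fs ih =>
    intro codes pid h
    have hlen := pv_step_len codes pid h f
    have h2 : (pvStepA (codes, pid) f).2 = pid + 1 := rfl
    have hle : pid + 1 ≤ (pvStepA (codes, pid) f).1.length := by rw [hlen]; omega
    have hkey : pvStepA (codes, pid) f = ((pvStepA (codes, pid) f).1, pid + 1) := by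
      rw [← h2]
    have := ih (pvStepA (codes, pid) f).1 (pid + 1) hle
    rw [List.foldl_cons, hkey, this, hlen]
    simp; omega

lemma pv_pick_cons (f : String) (fs : List String) (j : Nat) :
    pvPickOpt (j + 1) (f :: fs) = pvPickOpt j fs := by
  simp [pvPickOpt]

set_option maxHeartbeats 1000000 in
lemma pv_inner_getD (fields : List String) :
    ∀ (codes : List (List String)) (pid : Nat), pid ≤ codes.length → ∀ i,
    (fields.foldl pvStepA (codes, pid)).1.getD i [] =
      codes.getD i [] ++ (if pid ≤ i then (pvPickOpt (i - pid) fields).toList else []) := by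
  induction fields with
  | nil => intro codes pid h i; simp [pvPickOpt]
  | cons f fs ih =>
    intro codes pid h i
    have hlen := pv_step_len codes pid h f
    have hle : pid + 1 ≤ (pvStepA (codes, pid) f).1.length := by rw [hlen]; omega
    have h2 : (pvStepA (codes, pid) f).2 = pid + 1 := rfl
    have hkey : pvStepA (codes, pid) f = ((pvStepA (codes, pid) f).1, pid + 1) := by
      rw [← h2]
    have hih := ih (pvStepA (codes, pid) f).1 (pid + 1) hle i
    rw [List.foldl_cons, hkey, hih, pv_step_getD codes pid h f i, List.append_assoc]
    congr 1
    rcases lt_trichotomy i pid with hi | hi | hi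
    · rw [if_neg (by omega), if_neg (by omega), if_neg (by omega)]; rfl
    · subst hi
      rw [if_pos rfl, if_neg (by omega), if_pos (le_refl _)]
      simp only [Nat.sub_self]
      have : pvPickOpt 0 (f :: fs) = pvPickOpt 0 [f] := by simp [pvPickOpt]
      rw [this]; simp
    · rw [if_neg (by omega), if_pos (by omega), if_pos (by omega)]
      have h1 : i - pid = (i - (pid + 1)) + 1 := by omega
      rw [h1, pv_pick_cons]
      simp

-- the body of A's outer loop, named for the proofs
def pvOuterA (codes : List (List String)) (ln : String) : List (List String) :=
  let ln := PySem.Str.strip ln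
  if PySem.Str.len ln == 0 then codes
  else (((PySem.Str.split? ln "|").getD []).foldl pvStepA (codes, 0)).1

lemma pv_outer_len (segs : List String) :
    ∀ (init : List (List String)),
    (segs.foldl pvOuterA init).length = max init.length (pvWidth (segs.filterMap pvRowOf)) := by
  induction segs with
  | nil => intro init; simp [pvWidth]
  | cons seg segs ih =>
    intro init
    rw [List.foldl_cons, ih]
    by_cases hs : PySem.Str.strip seg = ""
    · have hA : pvOuterA init seg = init := by
        simp only [pvOuterA, pv_len_eq_zero, hs]; simp
      have hR : pvRowOf seg = none := by simp [pvRowOf, hs]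
      rw [hA, List.filterMap_cons, hR]
    · have hA : pvOuterA init seg =
          (((PySem.Str.split? (PySem.Str.strip seg) "|").getD []).foldl pvStepA (init, 0)).1 := by
        simp only [pvOuterA, pv_len_eq_zero, hs]; simp
      have hR : pvRowOf seg = some ((PySem.Str.split? (PySem.Str.strip seg) "|").getD []) := by
        simp [pvRowOf, hs]
      rw [hA, List.filterMap_cons, hR]
      rw [pv_inner_len _ init 0 (by omega)]
      simp [pvWidth]

set_option maxHeartbeats 1000000 in
lemma pv_outer_getD (segs : List String) :
    ∀ (init : List (List String)) (i : Nat),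
    (segs.foldl pvOuterA init).getD i [] =
      init.getD i [] ++ (segs.filterMap pvRowOf).filterMap (pvPickOpt i) := by
  induction segs with
  | nil => intro init i; simp
  | cons seg segs ih =>
    intro init i
    rw [List.foldl_cons, ih]
    by_cases hs : PySem.Str.strip seg = ""
    · have hA : pvOuterA init seg = init := by
        simp only [pvOuterA, pv_len_eq_zero, hs]; simp
      have hR : pvRowOf seg = none := by simp [pvRowOf, hs]
      rw [hA, List.filterMap_cons, hR]
    · have hA : pvOuterA init seg =
          (((PySem.Str.split? (PySem.Str.strip seg) "|").getD []).foldl pvStepA (init, 0)).1 := by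
        simp only [pvOuterA, pv_len_eq_zero, hs]; simp
      have hR : pvRowOf seg = some ((PySem.Str.split? (PySem.Str.strip seg) "|").getD []) := by
        simp [pvRowOf, hs]
      rw [hA, List.filterMap_cons, hR]
      rw [pv_inner_getD _ init 0 (by omega) i]
      rw [if_pos (by omega), List.append_assoc, Nat.sub_zero, pv_filterMap_cons_toList]

-- ===== VERDICT (by name: the statement is the Claim_ definition above) =====
theorem split_codes_spec : Claim_equal_split_codes := by
  intro code _
  unfold Spec_split_codes
  show split_codes code = split_codes_alt code
  have hA : split_codes code = ((PySem.Str.split? code ";").getD []).foldl pvOuterA [] := rfl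
  have hB : split_codes_alt code =
      (List.range ((((PySem.Str.split? code ";").getD []).filterMap pvRowOf).foldl
          (fun m r => max m r.length) 0)).map
        (fun i => (((PySem.Str.split? code ";").getD []).filterMap pvRowOf).filterMap (pvPickOpt i)) := rfl
  rw [hA, hB, pv_foldl_max]
  have hlenA : (((PySem.Str.split? code ";").getD []).foldl pvOuterA []).length =
      pvWidth (((PySem.Str.split? code ";").getD []).filterMap pvRowOf) := by
    rw [pv_outer_len]; simp
  apply List.ext_getElem
  · simpa using hlenA
  · intro i h1 h2
    rw [← List.getD_eq_getElem _ [] h1, pv_outer_getD]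
    simp
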